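-- pv_equiv track=rewrite | github.com/peterrowland/D08 | mimsmind1.py | get_cows
-- ===== SOURCE A (Python) =====
-- def get_bulls(guess, secret):
--     ''' Finds all matching characters in both strings.
--         returns count of "bulls" and their index in both lists'''
--     bulls_count = 0
--     bulls_index = []
--     #listify()
--     guess_lst = [x for x in guess]
--     secret_lst = [x for x in secret]
--     guess_no_bs = [x for x in guess]
--     secret_no_bs = [x for x in secret]
--     for i in range(len(guess_lst)):
--         if guess_lst[i] == secret_lst[i]:
--             bulls_count += 1
--             bulls_index.append(i)
--
--     return bulls_count, bulls_index
--
-- def listify(str):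
--     ''' Takes a string and returns a list '''
--     lst = [x for x in str]
--     return lst
--
-- def strip_bulls(lst, bulls_index):
--     ''' Takes list and index, returns list with items at index turned to blanks '''
--     for idx in bulls_index:
--         lst[idx] = ''
--     return lst
--
-- def return_unique(list_):
--     ''' Returns list of unique digits in a string '''
--     unique_list = []
--     back = 0
--     for i in range(len(list_)):
--         if list_[i] not in unique_list:
--             unique_list += list_[i]
--     return unique_list
--
-- def get_cows(guess, secret):
--     ''' Finds correct numbers in wrong position, after 'bulls' matches removed.
--     up to # of occurences in secret.
--     '''
--     # Sets up return variable
--     cows_count = 0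
--
--     # Gets results from bulls, assigns index to local var.
--     bulls = get_bulls(guess, secret)
--     bulls_index = bulls[1]
--
--     # Removes bulls in local list variables using bulls index.
--     guess_no_bs = strip_bulls(listify(guess), bulls_index)
--     secret_no_bs = strip_bulls(listify(secret), bulls_index)
--
--     # Gets unique digits out of guess_no_bs
--     unique_guess_no_bs = return_unique(guess_no_bs)
--
--     # Count loop
--     for item in unique_guess_no_bs:
--         guess_cows = guess_no_bs.count(item)
--         secret_cows = secret_no_bs.count(item)
--         cows_count += min(guess_cows, secret_cows)
--     return cows_count
-- ===== SOURCE B (Python) =====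
-- def get_cows(guess, secret):
--     ''' Cows = total per-digit colour matches minus bulls (exact identity). '''
--     bulls = 0
--     for i in range(len(guess)):
--         if guess[i] == secret[i]:
--             bulls += 1
--     g, s = list(guess), list(secret)
--     return sum(min(g.count(c), s.count(c)) for c in set(g)) - bulls
-- ===== Notes on version B (the rewrite author's own statement) =====
-- stated objective: simpler
-- what changed: Replaces A's strip-the-bulls / unique-extraction / residual-count pipeline by the identity cows = (sum over distinct guess digits of min(count in guess, count in secret)) - bulls, computed directly from the unmodified strings.
import Mathlib
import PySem

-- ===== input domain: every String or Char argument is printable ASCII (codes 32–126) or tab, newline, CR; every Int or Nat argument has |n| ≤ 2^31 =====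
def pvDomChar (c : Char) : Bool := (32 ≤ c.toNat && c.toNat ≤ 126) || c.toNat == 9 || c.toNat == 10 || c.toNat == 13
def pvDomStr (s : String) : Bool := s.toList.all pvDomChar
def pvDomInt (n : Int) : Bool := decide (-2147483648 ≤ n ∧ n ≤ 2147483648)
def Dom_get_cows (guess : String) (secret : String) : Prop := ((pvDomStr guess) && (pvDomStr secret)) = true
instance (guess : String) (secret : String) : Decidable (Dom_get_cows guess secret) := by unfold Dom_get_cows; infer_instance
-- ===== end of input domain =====

-- B computes cows as (total per-digit colour matches) - bulls directly on the two strings,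
-- replacing A's strip-the-bulls / unique-extraction / residual-count pipeline (objective: simpler).

-- ===== PORT A =====
-- Python's 1-character strings (elements of `listify`'s lists, blanked to '' by strip_bulls)
-- are modelled as Lean `String`s; `String.ofList [c]` is the 1-char string of c.
def listify (s : String) : List String := s.toList.map (fun c => String.ofList [c])

-- get_bulls also builds guess_no_bs/secret_no_bs but never uses them; they are dead code.
def get_bulls (guess : String) (secret : String) : Int × List Nat :=
  let guess_lst := listify guess
  let secret_lst := listify secret
  (List.range guess_lst.length).foldl
    (fun st i => if guess_lst.getD i "" = secret_lst.getD i "" then (st.1 + 1, st.2 ++ [i]) else st)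
    (0, [])

def strip_bulls (lst : List String) (bulls_index : List Nat) : List String :=
  bulls_index.foldl (fun l idx => l.set idx "") lst

-- `unique_list += list_[i]` extends the list by the CHARACTERS of the item ('' adds nothing).
def return_unique (list_ : List String) : List String :=
  (List.range list_.length).foldl
    (fun u i => if (list_.getD i "") ∈ u then u
                else u ++ (list_.getD i "").toList.map (fun c => String.ofList [c]))
    []

def get_cows (guess : String) (secret : String) : Int :=
  let cows_count : Int := 0
  let bulls := get_bulls guess secret
  let bulls_index := bulls.2
  let guess_no_bs := strip_bulls (listify guess) bulls_index
  let secret_no_bs := strip_bulls (listify secret) bulls_index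
  let unique_guess_no_bs := return_unique guess_no_bs
  unique_guess_no_bs.foldl
    (fun acc item =>
      acc + min ((PySem.List.count guess_no_bs item : Int)) ((PySem.List.count secret_no_bs item : Int)))
    cows_count

-- ===== PORT B =====
def get_cows_alt (guess : String) (secret : String) : Int :=
  let g := guess.toList
  let s := secret.toList
  let bulls : Int :=
    (List.range g.length).foldl
      (fun acc i => if g.getD i ' ' = s.getD i ' ' then acc + 1 else acc) 0
  ((PySem.Set.ofList g).map
      (fun c => min ((PySem.List.count g c : Int)) ((PySem.List.count s c : Int)))).sum
  - bulls

-- ===== PRECONDITION & SPEC =====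
-- A raises IndexError (secret_lst[i] in get_bulls) exactly when guess is longer than secret.
def Pre_get_cows (guess : String) (secret : String) : Prop :=
  guess.toList.length ≤ secret.toList.length
instance (guess : String) (secret : String) : Decidable (Pre_get_cows guess secret) := by
  unfold Pre_get_cows; infer_instance

def pvWitness_get_cows : String × String := ("1233", "3213")

def Spec_get_cows (guess : String) (secret : String) (out : Int) : Prop := out = get_cows_alt guess secret
instance (guess : String) (secret : String) (out : Int) : Decidable (Spec_get_cows guess secret out) := by unfold Spec_get_cows; infer_instance

-- ===== CLAIM (what is proved, stated in full; the proofs are below) =====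
def Claim_equal_get_cows : Prop := ∀ (guess : String) (secret : String), Dom_get_cows guess secret → Pre_get_cows guess secret → Spec_get_cows guess secret (get_cows guess secret)

-- ===== LEMMAS AND PROOFS =====



def pvEmb (c : Char) : String := String.ofList [c]
def pvP (g s : List Char) : Nat → Bool := fun i => decide (g.getD i ' ' = s.getD i ' ')
def pvI (g s : List Char) : List Nat := (List.range g.length).filter (pvP g s)
def pvGl (g s : List Char) : List String := (pvI g s).foldl (fun l i => l.set i "") (g.map pvEmb)
def pvSl (g s : List Char) : List String := (pvI g s).foldl (fun l i => l.set i "") (s.map pvEmb)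
def pvB (g s : List Char) (c : Char) : Nat :=
  (List.range g.length).countP (fun j => pvP g s j && (g.getD j ' ' == c))
theorem pvEmb_inj {a b : Char} (h : pvEmb a = pvEmb b) : a = b := by
  have := congrArg String.toList h; simpa [pvEmb] using this

theorem pvEmb_eq_iff {a b : Char} : pvEmb a = pvEmb b ↔ a = b :=
  ⟨pvEmb_inj, fun h => by rw [h]⟩

theorem pvEmb_ne_empty (c : Char) : pvEmb c ≠ "" := by
  intro h; have := congrArg String.toList h; simp [pvEmb] at this

theorem pvStripGet (lst : List String) (idx : List Nat) (j : Nat) :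
    (idx.foldl (fun l i => l.set i "") lst)[j]? =
      if j ∈ idx ∧ j < lst.length then some "" else lst[j]? := by
  induction idx generalizing lst with
  | nil => simp
  | cons i t ih =>
      simp only [List.foldl_cons, ih, List.length_set, List.getElem?_set, List.mem_cons]
      by_cases h1 : j ∈ t <;> by_cases h2 : j < lst.length <;> by_cases h3 : i = j <;>
        simp [h1, h2, h3] <;> omega

theorem pvStripLength (lst : List String) (idx : List Nat) :
    (idx.foldl (fun l i => l.set i "") lst).length = lst.length := by
  induction idx generalizing lst with
  | nil => rfl
  | cons i t ih => simp [List.foldl_cons, ih]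

theorem pvCountRange {α : Type} [DecidableEq α] (l : List α) (x d : α) :
    l.count x = (List.range l.length).countP (fun j => l.getD j d == x) := by
  induction l with
  | nil => simp
  | cons a t ih =>
      simp [List.range_succ_eq_map, List.countP_cons, List.countP_map, Function.comp_def,
        List.count_cons, ih]

theorem pvCountPSplit {α : Type} (l : List α) (p q : α → Bool) :
    l.countP p = l.countP (fun a => p a && q a) + l.countP (fun a => p a && !q a) := by
  induction l with
  | nil => simp
  | cons a t ih =>
      simp only [List.countP_cons, ih]
      by_cases hp : p a <;> by_cases hq : q a <;> simp [hp, hq] <;> ring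

-- mem pvI
theorem pvI_mem (g s : List Char) (j : Nat) : j ∈ pvI g s ↔ j < g.length ∧ pvP g s j := by
  simp [pvI, List.mem_filter]

-- pointwise value of pvGl
theorem pvGl_get (g s : List Char) (j : Nat) (hj : j < g.length) :
    (pvGl g s).getD j "" = if pvP g s j then "" else pvEmb (g.getD j ' ') := by
  have h1 : (pvGl g s)[j]? = if j ∈ pvI g s ∧ j < (g.map pvEmb).length then some "" else (g.map pvEmb)[j]? :=
    pvStripGet _ _ _
  rw [List.getD_eq_getElem?_getD, h1]
  by_cases hp : pvP g s j <;>
    simp [pvI_mem, hp, hj, List.getElem?_eq_getElem (by simpa using hj : j < (g.map pvEmb).length),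
      List.getD_eq_getElem, hj]

theorem pvSl_get (g s : List Char) (hnm : g.length ≤ s.length) (j : Nat) (hj : j < s.length) :
    (pvSl g s).getD j "" = if j < g.length ∧ pvP g s j then "" else pvEmb (s.getD j ' ') := by
  have h1 : (pvSl g s)[j]? = if j ∈ pvI g s ∧ j < (s.map pvEmb).length then some "" else (s.map pvEmb)[j]? :=
    pvStripGet _ _ _
  rw [List.getD_eq_getElem?_getD, h1]
  by_cases h2 : j < g.length <;> by_cases hp : pvP g s j = true <;>
    simp [pvI_mem, h2, hp, hj, List.getElem?_eq_getElem (by simpa using hj : j < (s.map pvEmb).length),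
      List.getD_eq_getElem, hj]

theorem pvGl_length (g s : List Char) : (pvGl g s).length = g.length := by
  simp [pvGl, pvStripLength]

theorem pvSl_length (g s : List Char) : (pvSl g s).length = s.length := by
  simp [pvSl, pvStripLength]

-- (M1)
theorem pvCountGuess (g s : List Char) (c : Char) :
    g.count c = pvB g s c + (pvGl g s).count (pvEmb c) := by
  have hG : (pvGl g s).count (pvEmb c)
      = (List.range g.length).countP (fun j => (g.getD j ' ' == c) && !(pvP g s j)) := by
    rw [pvCountRange (pvGl g s) (pvEmb c) ""]
    rw [pvGl_length]
    apply List.countP_congr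
    intro j hj
    have hj' : j < g.length := by simpa using hj
    rw [pvGl_get g s j hj']
    by_cases hp : pvP g s j
    · simp [hp, (pvEmb_ne_empty c).symm]
    · simp [hp, pvEmb_eq_iff]
  have := pvCountPSplit (List.range g.length) (fun j => (g.getD j ' ' == c)) (pvP g s)
  rw [pvCountRange g c ' ', this, hG, pvB]
  congr 1
  apply List.countP_congr; intro a _; simp [Bool.and_comm]

-- (M2)
theorem pvCountSecret (g s : List Char) (hnm : g.length ≤ s.length) (c : Char) :
    s.count c = pvB g s c + (pvSl g s).count (pvEmb c) := by
  have hS : (pvSl g s).count (pvEmb c)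
      = (List.range s.length).countP
          (fun j => (s.getD j ' ' == c) && !(decide (j < g.length) && pvP g s j)) := by
    rw [pvCountRange (pvSl g s) (pvEmb c) "", pvSl_length]
    apply List.countP_congr
    intro j hj
    have hj' : j < s.length := by simpa using hj
    rw [pvSl_get g s hnm j hj']
    by_cases h2 : j < g.length <;> by_cases hp : pvP g s j = true <;>
      simp [h2, hp, (pvEmb_ne_empty c).symm, pvEmb_eq_iff]
  have hsplit := pvCountPSplit (List.range s.length) (fun j => (s.getD j ' ' == c))
      (fun j => decide (j < g.length) && pvP g s j)
  have hbc : (List.range s.length).countP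
      (fun j => (s.getD j ' ' == c) && (decide (j < g.length) && pvP g s j)) = pvB g s c := by
    have hm : s.length = g.length + (s.length - g.length) := by omega
    rw [hm, List.range_add, List.countP_append, List.countP_map]
    have h0 : (List.range (s.length - g.length)).countP
        ((fun j => (s.getD j ' ' == c) && (decide (j < g.length) && pvP g s j)) ∘ (fun x => g.length + x)) = 0 := by
      apply List.countP_eq_zero.2
      intro j _
      simp only [Function.comp, Bool.and_eq_true, decide_eq_true_eq]
      rintro ⟨-, h, -⟩; omega
    rw [h0, Nat.add_zero, pvB]
    apply List.countP_congr
    intro j hj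
    have hj' : j < g.length := by simpa using hj
    by_cases hp : pvP g s j = true
    · have heq : g.getD j ' ' = s.getD j ' ' := by simpa [pvP] using hp
      have heq' : s[j]?.getD ' ' = g[j]?.getD ' ' := by
        simp only [List.getD_eq_getElem?_getD] at heq; exact heq.symm
      simp [hp, hj', heq', List.getElem?_eq_getElem hj']
    · simp [hp, hj']
  rw [pvCountRange s c ' ', hsplit, hbc, hS]

-- (M3) bulls partition by bull character
theorem pvBullsPartition (g s : List Char) :
    (List.range g.length).countP (pvP g s) = ∑ c ∈ g.toFinset, pvB g s c := by
  set K : List Char := ((List.range g.length).filter (pvP g s)).map (fun j => g.getD j ' ') with hK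
  have hlen : K.length = (List.range g.length).countP (pvP g s) := by
    simp [hK, List.countP_eq_length_filter]
  have hcount : ∀ c, K.count c = pvB g s c := by
    intro c
    rw [hK, pvB]
    rw [List.count_eq_countP]
    rw [List.countP_map, List.countP_filter]
    apply List.countP_congr
    intro j _
    simp [Function.comp, Bool.and_comm]
  have hsub : K.toFinset ⊆ g.toFinset := by
    intro c hc
    simp only [List.mem_toFinset] at hc ⊢
    rcases List.mem_map.1 (by rw [hK] at hc; exact hc) with ⟨j, hj, rfl⟩
    have hj' : j < g.length := by
      have := List.mem_filter.1 hj
      simpa using this.1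
    rw [List.getD_eq_getElem?_getD, List.getElem?_eq_getElem hj']
    exact List.getElem_mem _
  calc (List.range g.length).countP (pvP g s) = K.length := hlen.symm
    _ = ∑ c ∈ K.toFinset, K.count c := (List.sum_toFinset_count_eq_length K).symm
    _ = ∑ c ∈ g.toFinset, K.count c := by
        apply Finset.sum_subset hsub
        intro c _ hc
        simp only [List.mem_toFinset] at hc
        exact List.count_eq_zero.2 hc
    _ = ∑ c ∈ g.toFinset, pvB g s c := Finset.sum_congr rfl (fun c _ => hcount c)

-- (M4) the members of pvGl are '' or embedded characters of g
theorem pvGl_items (g s : List Char) (x : String) (hx : x ∈ pvGl g s) :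
    x = "" ∨ ∃ c : Char, c ∈ g ∧ x = pvEmb c := by
  rcases List.mem_iff_getElem?.1 hx with ⟨j, hj⟩
  have hj' : j < (pvGl g s).length := by
    by_contra h
    rw [List.getElem?_eq_none (by omega)] at hj
    simp at hj
  rw [pvGl_length] at hj'
  have := pvGl_get g s j hj'
  rw [List.getD_eq_getElem?_getD, hj] at this
  by_cases hp : pvP g s j = true
  · left; simp [hp] at this; exact this
  · right
    refine ⟨g[j], List.getElem_mem _, ?_⟩
    simp [hp, List.getD_eq_getElem?_getD, List.getElem?_eq_getElem hj'] at this
    exact this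


theorem pvMain (g s : List Char) (hnm : g.length ≤ s.length) :
    ((PySem.Set.ofList ((pvGl g s).filter (fun x => decide (x ≠ "")))).map
        (fun item => min (((pvGl g s).count item : Int)) (((pvSl g s).count item : Int)))).sum
    = ((PySem.Set.ofList g).map
        (fun c => min ((g.count c : Int)) ((s.count c : Int)))).sum
      - ((List.range g.length).countP (pvP g s) : Int) := by
  set f : String → Int := fun item => min (((pvGl g s).count item : Int)) (((pvSl g s).count item : Int)) with hf
  have hLHS : ((PySem.Set.ofList ((pvGl g s).filter (fun x => decide (x ≠ "")))).map f).sum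
      = ∑ c ∈ g.toFinset, min (((pvGl g s).count (pvEmb c) : Int)) (((pvSl g s).count (pvEmb c) : Int)) := by
    rw [← List.sum_toFinset f (PySem.Set.nodup_ofList _)]
    have hset : (PySem.Set.ofList ((pvGl g s).filter (fun x => decide (x ≠ "")))).toFinset
        = Finset.image pvEmb (g.toFinset.filter (fun c => (pvGl g s).count (pvEmb c) ≠ 0)) := by
      ext u
      simp only [List.mem_toFinset, PySem.Set.mem_ofList, List.mem_filter, Finset.mem_image,
        Finset.mem_filter, decide_eq_true_eq]
      constructor
      · rintro ⟨hu, hne⟩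
        rcases pvGl_items g s u hu with rfl | ⟨c, hcg, rfl⟩
        · exact absurd rfl hne
        · exact ⟨c, ⟨hcg, by rw [← List.count_pos_iff] at *; omega⟩, rfl⟩
      · rintro ⟨c, ⟨hcg, hcnt⟩, rfl⟩
        exact ⟨List.count_pos_iff.1 (Nat.pos_of_ne_zero hcnt), pvEmb_ne_empty c⟩
    rw [hset, Finset.sum_image (by intro a _ b _ h; exact pvEmb_inj h)]
    apply Finset.sum_subset (Finset.filter_subset _ _)
    intro c hc hnc
    simp only [Finset.mem_filter, not_and, Decidable.not_not] at hnc
    have h0 : (pvGl g s).count (pvEmb c) = 0 := hnc hc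
    simp only [hf, h0, Nat.cast_zero]
    have : (0:Int) ≤ ((pvSl g s).count (pvEmb c) : Int) := Int.natCast_nonneg _
    omega
  have hRHS : ((PySem.Set.ofList g).map (fun c => min ((g.count c : Int)) ((s.count c : Int)))).sum
      = ∑ c ∈ g.toFinset, min ((g.count c : Int)) ((s.count c : Int)) := by
    rw [← List.sum_toFinset _ (PySem.Set.nodup_ofList _)]
    congr 1
    ext c
    simp [PySem.Set.mem_ofList]
  rw [hLHS, hRHS, pvBullsPartition g s]
  push_cast
  rw [← Finset.sum_sub_distrib]
  apply Finset.sum_congr rfl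
  intro c _
  have h1 := pvCountGuess g s c
  have h2 := pvCountSecret g s hnm c
  have h1' : (g.count c : Int) = (pvB g s c : Int) + ((pvGl g s).count (pvEmb c) : Int) := by
    exact_mod_cast congrArg (Nat.cast : Nat → Int) h1
  have h2' : (s.count c : Int) = (pvB g s c : Int) + ((pvSl g s).count (pvEmb c) : Int) := by
    exact_mod_cast congrArg (Nat.cast : Nat → Int) h2
  omega

theorem pvRangeMapGetD {α : Type} (l : List α) (d : α) :
    (List.range l.length).map (fun i => l.getD i d) = l := by
  apply List.ext_getElem
  · simp
  · intro i h1 h2; simp [List.getD_eq_getElem?_getD, List.getElem?_eq_getElem h2]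

theorem pvFoldRangeGetD {α β : Type} (L : List α) (d : α) (F : β → α → β) (init : β) :
    (List.range L.length).foldl (fun u i => F u (L.getD i d)) init = L.foldl F init := by
  conv_rhs => rw [← pvRangeMapGetD L d]
  rw [List.foldl_map]

-- the bulls fold of port A
theorem pvBullFold (gl sl : List String) (c : Int) (acc : List Nat) (r : List Nat) :
    r.foldl (fun st i => if gl.getD i "" = sl.getD i "" then (st.1 + 1, st.2 ++ [i]) else st) (c, acc)
      = (c + ((r.filter (fun i => decide (gl.getD i "" = sl.getD i ""))).length : Int),
         acc ++ r.filter (fun i => decide (gl.getD i "" = sl.getD i ""))) := by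
  have hfun : (fun (st : Int × List Nat) i => if gl.getD i "" = sl.getD i "" then (st.1 + 1, st.2 ++ [i]) else st)
      = fun st i => ((if gl.getD i "" = sl.getD i "" then st.1 + 1 else st.1),
                     (if gl.getD i "" = sl.getD i "" then st.2 ++ [i] else st.2)) := by
    funext st i; split_ifs <;> rfl
  rw [hfun, PySem.List.foldl_prod_mk (f := fun a i => if gl.getD i "" = sl.getD i "" then a + 1 else a)
        (g := fun a i => if gl.getD i "" = sl.getD i "" then a ++ [i] else a)]
  rw [PySem.List.foldl_ite_add_one, PySem.List.foldl_append_ite_eq_filter]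
  simp [List.countP_eq_length_filter]

-- the unique fold of port A, on lists whose items are '' or 1-char strings
theorem pvUniqueFold (L : List String) (u0 : List String)
    (h : ∀ x ∈ L, x = "" ∨ ∃ c : Char, x = String.ofList [c]) :
    L.foldl (fun u x => if x ∈ u then u else u ++ x.toList.map (fun c => String.ofList [c])) u0
      = (L.filter (fun x => x ≠ "")).foldl PySem.Set.add u0 := by
  induction L generalizing u0 with
  | nil => rfl
  | cons a t ih =>
      have ha := h a (by simp)
      have ht : ∀ x ∈ t, x = "" ∨ ∃ c : Char, x = String.ofList [c] := fun x hx => h x (by simp [hx])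
      rcases ha with ha | ⟨c, hc⟩
      · subst ha
        simp only [List.foldl_cons]
        have : (if ("" : String) ∈ u0 then u0 else u0 ++ ("" : String).toList.map (fun c => String.ofList [c])) = u0 := by
          split_ifs <;> simp
        rw [this, ih _ ht]
        simp
      · subst hc
        simp only [List.foldl_cons]
        have hne : (String.ofList [c] : String) ≠ "" := by
          intro h'; have := congrArg String.toList h'; simp at this
        have hstep : (if (String.ofList [c]) ∈ u0 then u0 else u0 ++ (String.ofList [c]).toList.map (fun c => String.ofList [c]))
            = PySem.Set.add u0 (String.ofList [c]) := by
          simp [PySem.Set.add, PySem.Set.contains]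
        rw [hstep, ih _ ht]
        simp [hne]

-- ===== VERDICT (by name: the statement is the Claim_ definition above) =====
theorem get_cows_spec : Claim_equal_get_cows := by
  intro guess secret _ hpre
  unfold Spec_get_cows
  have hnm : guess.toList.length ≤ secret.toList.length := hpre
  set g := guess.toList with hg
  set s := secret.toList with hs
  have hlg : listify guess = g.map pvEmb := by rw [hg]; rfl
  have hls : listify secret = s.map pvEmb := by rw [hs]; rfl
  simp only [get_cows, get_cows_alt, get_bulls, strip_bulls, return_unique, hlg, hls,
    List.length_map]
  rw [pvBullFold]
  simp only [List.nil_append]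
  have hfilter : (List.range g.length).filter
      (fun i => decide ((g.map pvEmb).getD i "" = (s.map pvEmb).getD i "")) = pvI g s := by
    unfold pvI
    apply List.filter_congr
    intro i hi
    have hi' : i < g.length := by simpa using hi
    have his : i < s.length := lt_of_lt_of_le hi' hnm
    have e1 : (g.map pvEmb).getD i "" = pvEmb (g[i]'hi') := by
      rw [List.getD_eq_getElem?_getD, List.getElem?_eq_getElem (by simpa using hi')]
      simp
    have e2 : (s.map pvEmb).getD i "" = pvEmb (s[i]'his) := by
      rw [List.getD_eq_getElem?_getD, List.getElem?_eq_getElem (by simpa using his)]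
      simp
    rw [e1, e2]
    simp [pvP, pvEmb_eq_iff, List.getD_eq_getElem?_getD, List.getElem?_eq_getElem hi',
      List.getElem?_eq_getElem his]
  rw [hfilter]
  have hGl : ((pvI g s).foldl (fun l idx => l.set idx "") (g.map pvEmb)) = pvGl g s := rfl
  have hSl : ((pvI g s).foldl (fun l idx => l.set idx "") (s.map pvEmb)) = pvSl g s := rfl
  rw [hGl, hSl]
  rw [pvFoldRangeGetD (pvGl g s) ""
    (fun u x => if x ∈ u then u else u ++ x.toList.map (fun c => String.ofList [c])) []]
  rw [pvUniqueFold (pvGl g s) []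
    (fun x hx => (pvGl_items g s x hx).imp id (fun ⟨c, _, hc⟩ => ⟨c, hc⟩))]
  rw [← PySem.Set.ofList_eq_foldl]
  rw [PySem.List.foldl_add (g := fun item =>
    min ((PySem.List.count (pvGl g s) item : Int)) ((PySem.List.count (pvSl g s) item : Int)))]
  rw [PySem.List.foldl_ite_add_one]
  simp only [zero_add, PySem.List.count_eq]
  exact pvMain g s hnm
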